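-- pv_equiv track=rewrite | github.com/george-hcc/py-euler | 026_reciprocal_cycles.py | generate_periodics_dict
-- ===== SOURCE A (Python) =====
-- def generate_periodics_dict(max_n):
--     dof_periodics = {}
--     for n in range(2, max_n):
--         k = n
--         while k % 2 == 0:
--             k = k // 2
--         while k % 5 == 0:
--             k = k // 5
--         if k != 1:
--             if k in dof_periodics:
--                 dof_periodics[k].append(n)
--             else:
--                 dof_periodics[k] = [n]
--     return dof_periodics
-- ===== SOURCE B (Python) =====
-- def generate_periodics_dict(max_n):
--     result = {}
--     for k in range(3, max_n):
--         if k % 2 and k % 5: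
--             bucket = []
--             p2 = k
--             while p2 < max_n:
--                 p5 = p2
--                 while p5 < max_n:
--                     bucket.append(p5)
--                     p5 *= 5
--                 p2 *= 2
--             bucket.sort()
--             result[k] = bucket
--     return result
-- ===== Notes on version B (the rewrite author's own statement) =====
-- stated objective: faster
-- what changed: Instead of stripping factors of two and five from every n and growing buckets through dict membership tests, B enumerates each key coprime to ten once and generates its whole bucket directly as that key's multiples by powers of two and five below max_n, then sorts it; one dict insert per key and no per-element division loops.
import Mathlib
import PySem

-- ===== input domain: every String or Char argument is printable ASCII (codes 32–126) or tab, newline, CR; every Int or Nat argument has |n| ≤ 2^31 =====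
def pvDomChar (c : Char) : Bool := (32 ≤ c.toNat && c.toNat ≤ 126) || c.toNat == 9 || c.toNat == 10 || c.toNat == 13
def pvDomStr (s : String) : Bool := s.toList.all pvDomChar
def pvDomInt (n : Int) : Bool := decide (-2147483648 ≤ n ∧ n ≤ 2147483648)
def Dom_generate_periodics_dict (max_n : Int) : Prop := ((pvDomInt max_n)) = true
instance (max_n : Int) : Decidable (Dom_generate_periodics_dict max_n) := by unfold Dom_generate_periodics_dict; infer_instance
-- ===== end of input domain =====

-- B groups each n under the part of n left after removing factors of two and five, by
-- generating every key's bucket directly as its multiples by powers of two and five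
-- (instead of stripping factors from each n); measured faster by a constant factor.

-- ===== PORT A =====
-- the 'while k % 2 == 0' loop of A ('0 < k' is a totality guard: every n A processes is ≥ 2)
def pvStrip2 (k : Int) : Int :=
  if 0 < k ∧ k % 2 = 0 then pvStrip2 (PySem.Int.floordiv k 2) else k
termination_by k.toNat
decreasing_by
  rename_i h
  rw [PySem.Int.floordiv_eq_ediv_of_pos (by omega : (0:ℤ) < 2)]
  omega

-- the 'while k % 5 == 0' loop of A (same totality guard)
def pvStrip5 (k : Int) : Int :=
  if 0 < k ∧ k % 5 = 0 then pvStrip5 (PySem.Int.floordiv k 5) else k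
termination_by k.toNat
decreasing_by
  rename_i h
  rw [PySem.Int.floordiv_eq_ediv_of_pos (by omega : (0:ℤ) < 5)]
  omega

-- the body of A's 'for n in range(2, max_n)' loop
def pvStepA (d : PySem.Dict Int (List Int)) (n : Int) : PySem.Dict Int (List Int) :=
  let k := pvStrip5 (pvStrip2 n)
  if k ≠ 1 then
    if d.contains k then PySem.Dict.modify d k [] (fun l => l ++ [n])
    else d.insert k [n]
  else d

def generate_periodics_dict (max_n : Int) : List (Int × List Int) :=
  ((PySem.List.pyRange 2 max_n 1).foldl pvStepA PySem.Dict.empty).items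

-- ===== PORT B =====
-- B's inner 'while p5 < max_n' loop, returning the appended elements ('0 < p' is a totality guard: p starts at k ≥ 3)
def pvGen5 (bound p : Int) : List Int :=
  if 0 < p ∧ p < bound then p :: pvGen5 bound (p * 5) else []
termination_by (bound - p).toNat
decreasing_by
  rename_i h
  omega

-- B's outer 'while p2 < max_n' loop (same totality guard)
def pvGen2 (bound p : Int) : List Int :=
  if 0 < p ∧ p < bound then pvGen5 bound p ++ pvGen2 bound (p * 2) else []
termination_by (bound - p).toNat
decreasing_by
  rename_i h
  omega

def generate_periodics_dict_alt (max_n : Int) : List (Int × List Int) :=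
  ((PySem.List.pyRange 3 max_n 1).foldl (fun d k =>
      if k % 2 ≠ 0 ∧ k % 5 ≠ 0 then
        d.insert k (PySem.List.sorted (pvGen2 max_n k) (fun x => x) false)
      else d)
    PySem.Dict.empty).items

-- ===== PRECONDITION & SPEC =====
def Spec_generate_periodics_dict (max_n : Int) (out : List (Int × List Int)) : Prop := out = generate_periodics_dict_alt max_n
instance (max_n : Int) (out : List (Int × List Int)) : Decidable (Spec_generate_periodics_dict max_n out) := by unfold Spec_generate_periodics_dict; infer_instance

-- ===== CLAIM (what is proved, stated in full; the proofs are below) =====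
def Claim_equal_generate_periodics_dict : Prop := ∀ (max_n : Int), Dom_generate_periodics_dict max_n → Spec_generate_periodics_dict max_n (generate_periodics_dict max_n)

-- ===== LEMMAS AND PROOFS =====

-- abbreviation used only in proofs
def pvStrip (n : Int) : Int := pvStrip5 (pvStrip2 n)

-- the clean list form of B's result
def pvBclean (m : Int) : List (Int × List Int) :=
  ((PySem.List.pyRange 3 m 1).filter (fun k => decide (k % 2 ≠ 0 ∧ k % 5 ≠ 0))).map
    (fun k => (k, PySem.List.sorted (pvGen2 m k) (fun x => x) false))

-- ---- strip lemmas ----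
lemma pvStrip2_spec (x : Int) : 0 < x →
    ∃ a : ℕ, x = pvStrip2 x * 2 ^ a ∧ pvStrip2 x % 2 = 1 ∧ 0 < pvStrip2 x ∧ pvStrip2 x ≤ x := by
  fun_induction pvStrip2 x with
  | case1 k h ih =>
      intro hk
      rw [PySem.Int.floordiv_eq_ediv_of_pos (by omega : (0:ℤ) < 2)] at ih ⊢
      have h2 : 0 < k / 2 := by omega
      obtain ⟨a, ha, hodd, hpos, hle⟩ := ih h2
      refine ⟨a + 1, ?_, hodd, hpos, by omega⟩
      rw [pow_succ, show pvStrip2 (k/2) * (2^a * 2) = (pvStrip2 (k/2) * 2^a) * 2 by ring, ← ha]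
      omega
  | case2 k h =>
      intro hk
      exact ⟨0, by simp, by omega, hk, le_refl k⟩

lemma pvStrip5_spec (x : Int) : 0 < x →
    ∃ b : ℕ, x = pvStrip5 x * 5 ^ b ∧ pvStrip5 x % 5 ≠ 0 ∧ 0 < pvStrip5 x ∧ pvStrip5 x ≤ x ∧
      (x % 2 = 1 → pvStrip5 x % 2 = 1) := by
  fun_induction pvStrip5 x with
  | case1 k h ih =>
      intro hk
      rw [PySem.Int.floordiv_eq_ediv_of_pos (by omega : (0:ℤ) < 5)] at ih ⊢
      have h5 : 0 < k / 5 := by omega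
      obtain ⟨b, hb, hnd, hpos, hle, hodd⟩ := ih h5
      refine ⟨b + 1, ?_, hnd, hpos, by omega, ?_⟩
      · rw [pow_succ, show pvStrip5 (k/5) * (5^b * 5) = (pvStrip5 (k/5) * 5^b) * 5 by ring, ← hb]
        omega
      · intro hk2
        exact hodd (by omega)
  | case2 k h =>
      intro hk
      exact ⟨0, by simp, by omega, hk, le_refl k, fun h2 => h2⟩

lemma pvStrip2_odd (x : Int) (hx : x % 2 ≠ 0) : pvStrip2 x = x := by
  rw [pvStrip2]; simp [hx]

lemma pvStrip5_nd (x : Int) (hx : x % 5 ≠ 0) : pvStrip5 x = x := by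
  rw [pvStrip5]; simp [hx]

lemma pvStrip_coprime_self (x : Int) (h2 : x % 2 ≠ 0) (h5 : x % 5 ≠ 0) : pvStrip x = x := by
  rw [pvStrip, pvStrip2_odd x h2, pvStrip5_nd x h5]

lemma pvStrip2_mul_pow2 (x : Int) (hx : 0 < x) (a : ℕ) : pvStrip2 (x * 2 ^ a) = pvStrip2 x := by
  induction a with
  | zero => simp
  | succ a ih =>
      have h1 : x * 2 ^ (a + 1) = x * 2 ^ a * 2 := by ring
      have hpos : 0 < x * 2 ^ a * 2 := by positivity
      rw [h1, pvStrip2, if_pos ⟨hpos, Int.mul_emod_left _ _⟩,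
        PySem.Int.floordiv_eq_ediv_of_pos (by omega : (0:ℤ) < 2),
        Int.mul_ediv_cancel _ (by norm_num)]
      exact ih

lemma pvStrip5_mul_pow5 (x : Int) (hx : 0 < x) (hx5 : x % 5 ≠ 0) (b : ℕ) :
    pvStrip5 (x * 5 ^ b) = x := by
  induction b with
  | zero => simpa using pvStrip5_nd x hx5
  | succ b ih =>
      have h1 : x * 5 ^ (b + 1) = x * 5 ^ b * 5 := by ring
      have hpos : 0 < x * 5 ^ b * 5 := by positivity
      rw [h1, pvStrip5, if_pos ⟨hpos, Int.mul_emod_left _ _⟩,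
        PySem.Int.floordiv_eq_ediv_of_pos (by omega : (0:ℤ) < 5),
        Int.mul_ediv_cancel _ (by norm_num)]
      exact ih

lemma pvPow5_odd (c : ℕ) : (5 : ℤ) ^ c % 2 = 1 :=
  Int.odd_iff.mp (Odd.pow (by norm_num))

-- strip of k * 2^a * 5^b is k, for k coprime to 10
lemma pvStrip_val (k : Int) (hk0 : 0 < k) (hk2 : k % 2 ≠ 0) (hk5 : k % 5 ≠ 0) (a b : ℕ) :
    pvStrip (k * 2 ^ a * 5 ^ b) = k := by
  have h1 : k * 2 ^ a * 5 ^ b = (k * 5 ^ b) * 2 ^ a := by ring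
  have hpos : 0 < k * 5 ^ b := by positivity
  have hodd : (k * 5 ^ b) % 2 ≠ 0 := by
    rw [Int.mul_emod, pvPow5_odd]
    omega
  rw [pvStrip, h1, pvStrip2_mul_pow2 _ hpos, pvStrip2_odd _ hodd,
    pvStrip5_mul_pow5 k hk0 hk5]

lemma pvStrip_spec (x : Int) (hx : 0 < x) :
    ∃ a b : ℕ, x = pvStrip x * 2 ^ a * 5 ^ b ∧ pvStrip x % 2 = 1 ∧ pvStrip x % 5 ≠ 0 ∧
      0 < pvStrip x ∧ pvStrip x ≤ x := by
  obtain ⟨a, ha, hodd2, hpos2, hle2⟩ := pvStrip2_spec x hx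
  obtain ⟨b, hb, hnd5, hpos5, hle5, hodd5⟩ := pvStrip5_spec (pvStrip2 x) hpos2
  refine ⟨a, b, ?_, hodd5 hodd2, hnd5, hpos5, le_trans hle5 hle2⟩
  rw [pvStrip, show pvStrip5 (pvStrip2 x) * 2 ^ a * 5 ^ b = (pvStrip5 (pvStrip2 x) * 5 ^ b) * 2 ^ a by ring,
    ← hb, ← ha]

lemma pvStrip_eq_iff (x k : Int) (hx : 0 < x) (hk0 : 0 < k) (hk2 : k % 2 ≠ 0) (hk5 : k % 5 ≠ 0) :
    pvStrip x = k ↔ ∃ a b : ℕ, x = k * 2 ^ a * 5 ^ b := by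
  constructor
  · intro hs
    obtain ⟨a, b, hab, _, _, _, _⟩ := pvStrip_spec x hx
    exact ⟨a, b, by rw [← hs]; exact hab⟩
  · rintro ⟨a, b, rfl⟩
    exact pvStrip_val k hk0 hk2 hk5 a b

-- ---- gen lemmas ----
lemma pvGen5_mem (b p x : Int) : 0 < p →
    (x ∈ pvGen5 b p ↔ ∃ c : ℕ, x = p * 5 ^ c ∧ x < b) := by
  fun_induction pvGen5 b p with
  | case1 p h ih =>
      intro hp
      have ih5 := ih (by positivity)
      simp only [List.mem_cons, ih5]
      constructor
      · rintro (rfl | ⟨c, rfl, hlt⟩)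
        · exact ⟨0, by ring, h.2⟩
        · exact ⟨c + 1, by ring, hlt⟩
      · rintro ⟨c, rfl, hlt⟩
        cases c with
        | zero => left; ring
        | succ c => right; exact ⟨c, by ring, hlt⟩
  | case2 p h =>
      intro hp
      simp only [List.not_mem_nil, false_iff]
      rintro ⟨c, rfl, hlt⟩
      have h5 : (1:ℤ) ≤ 5 ^ c := one_le_pow₀ (by norm_num)
      have hbp : b ≤ p := by omega
      have : p ≤ p * 5 ^ c := le_mul_of_one_le_right (le_of_lt hp) h5
      omega

lemma pvGen5_lb (b p x : Int) (hp : 0 < p) (hx : x ∈ pvGen5 b p) : p ≤ x := by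
  obtain ⟨c, rfl, _⟩ := (pvGen5_mem b p x hp).mp hx
  have h5 : (1:ℤ) ≤ 5 ^ c := one_le_pow₀ (by norm_num)
  nlinarith

lemma pvGen5_pairwise (b p : Int) : (pvGen5 b p).Pairwise (· < ·) := by
  fun_induction pvGen5 b p with
  | case1 p h ih =>
      refine List.Pairwise.cons ?_ ih
      intro x hx
      have := pvGen5_lb b (p * 5) x (by nlinarith [h.1]) hx
      nlinarith [h.1]
  | case2 p h => exact List.Pairwise.nil

lemma pvGen2_mem (b p x : Int) : 0 < p →
    (x ∈ pvGen2 b p ↔ ∃ a c : ℕ, x = p * 2 ^ a * 5 ^ c ∧ x < b) := by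
  fun_induction pvGen2 b p with
  | case1 p h ih =>
      intro hp
      have ih2 := ih (by positivity)
      simp only [List.mem_append, pvGen5_mem b p x hp, ih2]
      constructor
      · rintro (⟨c, rfl, hlt⟩ | ⟨a, c, rfl, hlt⟩)
        · exact ⟨0, c, by ring, hlt⟩
        · exact ⟨a + 1, c, by ring, hlt⟩
      · rintro ⟨a, c, rfl, hlt⟩
        cases a with
        | zero => left; exact ⟨c, by ring, hlt⟩
        | succ a => right; exact ⟨a, c, by ring, hlt⟩
  | case2 p h =>
      intro hp
      simp only [List.not_mem_nil, false_iff]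
      rintro ⟨a, c, rfl, hlt⟩
      have h2 : (1:ℤ) ≤ 2 ^ a := one_le_pow₀ (by norm_num)
      have h5 : (1:ℤ) ≤ 5 ^ c := one_le_pow₀ (by norm_num)
      have hbp : b ≤ p := by omega
      have h25 : (1:ℤ) ≤ 2 ^ a * 5 ^ c := by nlinarith
      have hpp : p ≤ p * (2 ^ a * 5 ^ c) := le_mul_of_one_le_right (le_of_lt hp) h25
      have he : p * 2 ^ a * 5 ^ c = p * (2 ^ a * 5 ^ c) := by ring
      omega

lemma pvGen2_nodup (b p : Int) : (pvGen2 b p).Nodup := by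
  fun_induction pvGen2 b p with
  | case1 p h ih =>
      rw [List.nodup_append]
      refine ⟨(pvGen5_pairwise b p).imp (fun h => ne_of_lt h), ih, ?_⟩
      intro x hx1 y hy
      rintro rfl
      obtain ⟨c, hxc, _⟩ := (pvGen5_mem b p x h.1).mp hx1
      obtain ⟨a, c', he, _⟩ := (pvGen2_mem b (p * 2) x (by nlinarith [h.1])).mp hy
      have hc : p * (5 ^ c : ℤ) = p * (2 ^ (a + 1) * 5 ^ c') := by
        rw [← hxc, he]; ring
      have hc2 : (5:ℤ) ^ c = 2 ^ (a + 1) * 5 ^ c' := mul_left_cancel₀ (ne_of_gt h.1) hc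
      have h1 : (5:ℤ) ^ c % 2 = 1 := pvPow5_odd c
      have h2 : ((2:ℤ) ^ (a + 1) * 5 ^ c') % 2 = 0 := by
        rw [show (2:ℤ) ^ (a + 1) * 5 ^ c' = 2 * (2 ^ a * 5 ^ c') by ring]
        exact Int.mul_emod_right _ _
      rw [hc2] at h1
      omega
  | case2 h => exact List.nodup_nil

lemma pvGen2_mem_strip (b k x : Int) (hk0 : 0 < k) (hk2 : k % 2 ≠ 0) (hk5 : k % 5 ≠ 0) :
    x ∈ pvGen2 b k ↔ 0 < x ∧ pvStrip x = k ∧ x < b := by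
  rw [pvGen2_mem b k x hk0]
  constructor
  · rintro ⟨a, c, rfl, hlt⟩
    have h2 : (1:ℤ) ≤ 2 ^ a := one_le_pow₀ (by norm_num)
    have h5 : (1:ℤ) ≤ 5 ^ c := one_le_pow₀ (by norm_num)
    exact ⟨by positivity, pvStrip_val k hk0 hk2 hk5 a c, hlt⟩
  · rintro ⟨hx0, hs, hlt⟩
    obtain ⟨a, c, hac⟩ := (pvStrip_eq_iff x k hx0 hk0 hk2 hk5).mp hs
    exact ⟨a, c, hac, hlt⟩

-- the bucket of k for bound b+1 versus bound b
lemma pvBucket_step (k b : Int) (hk0 : 0 < k) (hk2 : k % 2 ≠ 0) (hk5 : k % 5 ≠ 0) (hb : 0 < b) :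
    PySem.List.sorted (pvGen2 (b + 1) k) (fun x => x) false =
      if pvStrip b = k then PySem.List.sorted (pvGen2 b k) (fun x => x) false ++ [b]
      else PySem.List.sorted (pvGen2 b k) (fun x => x) false := by
  have hms := fun b' x => pvGen2_mem_strip b' k x hk0 hk2 hk5
  split_ifs with hsb
  · have hnd1 : (pvGen2 (b + 1) k).Nodup := pvGen2_nodup _ _
    have hnd2 : (pvGen2 b k ++ [b]).Nodup := by
      rw [List.nodup_append]
      refine ⟨pvGen2_nodup _ _, List.nodup_singleton _, ?_⟩
      intro x hx1 y hy
      rw [List.mem_singleton] at hy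
      obtain ⟨_, _, hlt⟩ := (hms b x).mp hx1
      omega
    have hperm : (pvGen2 b k ++ [b]).Perm (pvGen2 (b + 1) k) := by
      rw [List.perm_ext_iff_of_nodup hnd2 hnd1]
      intro x
      rw [List.mem_append, List.mem_singleton, hms b x, hms (b + 1) x]
      constructor
      · rintro (⟨h1, h2, h3⟩ | rfl)
        · exact ⟨h1, h2, by omega⟩
        · exact ⟨hb, hsb, by omega⟩
      · rintro ⟨h1, h2, h3⟩
        by_cases hxb : x = b
        · right; exact hxb
        · left; exact ⟨h1, h2, by omega⟩
    have hpw : (PySem.List.sorted (pvGen2 b k) (fun x => x) false ++ [b]).Pairwise (· < ·) := by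
      rw [List.pairwise_append]
      refine ⟨?_, List.pairwise_singleton _ _, ?_⟩
      · have hle := PySem.List.sorted_pairwise (pvGen2 b k) (fun x => x)
        have hnd : (PySem.List.sorted (pvGen2 b k) (fun x => x) false).Nodup :=
          (PySem.List.sorted_perm (pvGen2 b k) (fun x => x) false).nodup_iff.mpr (pvGen2_nodup _ _)
        exact (hle.and hnd).imp (fun h => lt_of_le_of_ne h.1 h.2)
      · intro x hx y hy
        rw [List.mem_singleton] at hy
        rw [PySem.List.mem_sorted] at hx
        obtain ⟨_, _, hlt⟩ := (hms b x).mp hx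
        omega
    have := PySem.List.sorted_eq_of_perm_of_pairwise_lt (pvGen2 (b + 1) k)
      (PySem.List.sorted (pvGen2 b k) (fun x => x) false ++ [b]) (fun x => x)
      (((PySem.List.sorted_perm (pvGen2 b k) (fun x => x) false).append_right [b]).trans hperm) hpw
    exact this
  · apply PySem.List.sorted_eq_sorted_of_perm _ _ _ (fun a b h => h)
    rw [List.perm_ext_iff_of_nodup (pvGen2_nodup _ _) (pvGen2_nodup _ _)]
    intro x
    rw [hms (b + 1) x, hms b x]
    constructor
    · rintro ⟨h1, h2, h3⟩
      have : x ≠ b := by rintro rfl; exact hsb h2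
      exact ⟨h1, h2, by omega⟩
    · rintro ⟨h1, h2, h3⟩
      exact ⟨h1, h2, by omega⟩

-- ---- dict plumbing ----
lemma pvFoldl_if_insert_items (f : Int → List Int) :
    ∀ (l : List Int) (d : PySem.Dict Int (List Int)), l.Nodup →
      (∀ k ∈ l, d.contains k = false) →
      (l.foldl (fun d k => if k % 2 ≠ 0 ∧ k % 5 ≠ 0 then d.insert k (f k) else d) d).items =
        d.items ++ (l.filter (fun k => decide (k % 2 ≠ 0 ∧ k % 5 ≠ 0))).map (fun k => (k, f k)) := by
  intro l
  induction l with
  | nil => intro d _ _; simp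
  | cons a l ih =>
      intro d hnd hf
      simp only [List.foldl_cons]
      by_cases hpa : a % 2 ≠ 0 ∧ a % 5 ≠ 0
      · rw [if_pos hpa]
        have hca : d.contains a = false := hf a List.mem_cons_self
        have h1 : ∀ k ∈ l, (d.insert a (f a)).contains k = false := by
          intro k hk
          rw [PySem.Dict.contains_insert]
          have hka : k ≠ a := by rintro rfl; exact (List.nodup_cons.mp hnd).1 hk
          simp [hka, hf k (List.mem_cons_of_mem _ hk)]
        rw [ih (d.insert a (f a)) (List.nodup_cons.mp hnd).2 h1,
          PySem.Dict.items_insert_of_not_contains d (f a) hca,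
          List.filter_cons, decide_eq_true hpa]
        simp
      · rw [if_neg hpa,
          ih d (List.nodup_cons.mp hnd).2 (fun k hk => hf k (List.mem_cons_of_mem _ hk)),
          List.filter_cons, decide_eq_false hpa]
        simp

lemma pvAlt_eq_clean (m : Int) : generate_periodics_dict_alt m = pvBclean m := by
  unfold generate_periodics_dict_alt pvBclean
  rw [pvFoldl_if_insert_items (fun k => PySem.List.sorted (pvGen2 m k) (fun x => x) false)
    (PySem.List.pyRange 3 m 1) PySem.Dict.empty (PySem.List.nodup_pyRange_one 3 m)
    (fun k _ => rfl)]
  rfl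

lemma pvGetD_mk_map (l : List Int) (g : Int → List Int) (k : Int) (hk : k ∈ l) :
    (PySem.Dict.mk (l.map (fun x => (x, g x)))).getD k [] = g k := by
  induction l with
  | nil => simp at hk
  | cons a l ih =>
      rw [List.mem_cons] at hk
      by_cases hka : a = k
      · subst hka
        simp [PySem.Dict.getD, List.map_cons, PySem.Dict.get?_mk_cons]
      · have hk' : k ∈ l := by tauto
        have := ih hk'
        simp only [PySem.Dict.getD] at this ⊢
        rw [List.map_cons, PySem.Dict.get?_mk_cons]
        simp [hka]
        exact this

-- membership in the clean list's key set
lemma pvMem_filter_range (m k : Int) :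
    k ∈ (PySem.List.pyRange 3 m 1).filter (fun k => decide (k % 2 ≠ 0 ∧ k % 5 ≠ 0)) ↔
      3 ≤ k ∧ k < m ∧ k % 2 ≠ 0 ∧ k % 5 ≠ 0 := by
  rw [List.mem_filter, PySem.List.mem_pyRange_one]
  simp only [decide_eq_true_eq]
  tauto


lemma pvStepA_eq (d : PySem.Dict Int (List Int)) (n : Int) :
    pvStepA d n = if pvStrip n ≠ 1 then
      (if d.contains (pvStrip n) then PySem.Dict.modify d (pvStrip n) [] (fun l => l ++ [n])
       else d.insert (pvStrip n) [n])
    else d := rfl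

lemma pvBclean_succ (m : Int) (hm : 2 ≤ m) :
    pvBclean (m + 1) =
      ((PySem.List.pyRange 3 m 1).filter (fun x => decide (x % 2 ≠ 0 ∧ x % 5 ≠ 0))).map
        (fun x => (x, PySem.List.sorted (pvGen2 (m + 1) x) (fun y => y) false)) ++
      (if m % 2 ≠ 0 ∧ m % 5 ≠ 0 then
        [(m, PySem.List.sorted (pvGen2 (m + 1) m) (fun y => y) false)] else []) := by
  by_cases hm3 : 3 ≤ m
  · unfold pvBclean
    rw [PySem.List.pyRange_one_succ_right (by omega : (3:ℤ) ≤ m), List.filter_append,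
      List.map_append]
    congr 1
    by_cases hc : m % 2 ≠ 0 ∧ m % 5 ≠ 0
    · rw [if_pos hc, List.filter_singleton, decide_eq_true hc]
      simp
    · rw [if_neg hc, List.filter_singleton, decide_eq_false hc]
      simp
  · have hm2 : m = 2 := by omega
    subst hm2
    decide

lemma pvContains_mk_map (l : List Int) (g : Int → List Int) (x : Int) :
    (PySem.Dict.mk (l.map (fun k => (k, g k)))).contains x = true ↔ x ∈ l := by
  rw [PySem.Dict.contains_mk, List.any_map, List.any_eq_true]
  constructor
  · rintro ⟨a, ha, he⟩
    have : a = x := by simpa using he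
    exact this ▸ ha
  · intro hx
    exact ⟨x, hx, by simp⟩

lemma pvSorted_singleton (x : Int) : PySem.List.sorted [x] (fun y => y) false = [x] :=
  PySem.List.sorted_eq_self_of_pairwise _ _ (List.pairwise_singleton _ _)

lemma pvGen2_self_succ (m : Int) (hm : 0 < m) : pvGen2 (m + 1) m = [m] := by
  rw [pvGen2, if_pos ⟨hm, by omega⟩, pvGen5, if_pos ⟨hm, by omega⟩,
    pvGen5, if_neg (by omega : ¬(0 < m * 5 ∧ m * 5 < m + 1)),
    pvGen2, if_neg (by omega : ¬(0 < m * 2 ∧ m * 2 < m + 1))]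
  simp

-- ---- main induction ----
lemma pvMain_aux (j : ℕ) :
    ((PySem.List.pyRange 2 (2 + (j : Int)) 1).foldl pvStepA PySem.Dict.empty).items =
      pvBclean (2 + (j : Int)) := by
  induction j with
  | zero => decide
  | succ j ih =>
      have hcast : 2 + ((j + 1 : ℕ) : Int) = (2 + (j : Int)) + 1 := by push_cast; ring
      set m : Int := 2 + (j : Int) with hmdef
      have hm2 : (2:ℤ) ≤ m := by omega
      rw [hcast, PySem.List.pyRange_one_succ_right (by omega : (2:ℤ) ≤ m), List.foldl_append,
        List.foldl_cons, List.foldl_nil]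
      have hd : (PySem.List.pyRange 2 m 1).foldl pvStepA PySem.Dict.empty =
          PySem.Dict.mk (pvBclean m) := PySem.Dict.ext ih
      rw [hd, pvStepA_eq]
      obtain ⟨a0, b0, hab, hk2, hk5, hk0, hkle⟩ := pvStrip_spec m (by omega)
      have hstep : ∀ x, 3 ≤ x → x < m → x % 2 ≠ 0 → x % 5 ≠ 0 → pvStrip m ≠ x →
          PySem.List.sorted (pvGen2 (m + 1) x) (fun y => y) false =
          PySem.List.sorted (pvGen2 m x) (fun y => y) false := by
        intro x h3 _ h2 h5 hne
        have hb := pvBucket_step x m (by omega) h2 h5 (by omega)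
        rwa [if_neg (fun hh => hne hh)] at hb
      by_cases hk1 : pvStrip m = 1
      · rw [if_neg (by simp [hk1])]
        show pvBclean m = pvBclean (m + 1)
        rw [pvBclean_succ m hm2]
        have hcm : ¬(m % 2 ≠ 0 ∧ m % 5 ≠ 0) := by
          rintro ⟨h2, h5⟩
          have := pvStrip_coprime_self m h2 h5
          omega
        rw [if_neg hcm, List.append_nil]
        unfold pvBclean
        apply List.map_congr_left
        intro x hx
        rw [pvMem_filter_range] at hx
        obtain ⟨h3, hlt, h2, h5⟩ := hx
        rw [hstep x h3 hlt h2 h5 (by omega)]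
      · rw [if_pos hk1]
        have hk3 : 3 ≤ pvStrip m := by omega
        by_cases hkm : pvStrip m = m
        · have hnin : pvStrip m ∉ (PySem.List.pyRange 3 m 1).filter
              (fun x => decide (x % 2 ≠ 0 ∧ x % 5 ≠ 0)) := by
            rw [pvMem_filter_range]
            omega
          have hcf : (PySem.Dict.mk (pvBclean m)).contains (pvStrip m) = false := by
            cases hb : (PySem.Dict.mk (pvBclean m)).contains (pvStrip m) with
            | false => rfl
            | true =>
                exfalso
                unfold pvBclean at hb
                exact hnin ((pvContains_mk_map _ _ _).mp hb)
          rw [if_neg (by simp [hcf]), PySem.Dict.items_insert_of_not_contains _ _ hcf]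
          rw [pvBclean_succ m hm2, if_pos ⟨by omega, by omega⟩]
          show pvBclean m ++ _ = _
          congr 1
          · unfold pvBclean
            apply List.map_congr_left
            intro x hx
            rw [pvMem_filter_range] at hx
            obtain ⟨h3, hlt, h2, h5⟩ := hx
            rw [hstep x h3 hlt h2 h5 (by omega)]
          · rw [pvGen2_self_succ m (by omega), pvSorted_singleton, hkm]
        · have hkin : pvStrip m ∈ (PySem.List.pyRange 3 m 1).filter
              (fun x => decide (x % 2 ≠ 0 ∧ x % 5 ≠ 0)) := by
            rw [pvMem_filter_range]
            exact ⟨hk3, by omega, by omega, hk5⟩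
          have hct : (PySem.Dict.mk (pvBclean m)).contains (pvStrip m) = true := by
            unfold pvBclean
            exact (pvContains_mk_map _ _ _).mpr hkin
          rw [if_pos hct]
          simp only [PySem.Dict.modify]
          rw [PySem.Dict.items_insert_of_contains _ _ hct]
          have hgetD : (PySem.Dict.mk (pvBclean m)).getD (pvStrip m) [] =
              PySem.List.sorted (pvGen2 m (pvStrip m)) (fun y => y) false := by
            unfold pvBclean
            exact pvGetD_mk_map _ _ _ hkin
          rw [hgetD, pvBclean_succ m hm2]
          have hcm : ¬(m % 2 ≠ 0 ∧ m % 5 ≠ 0) := by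
            rintro ⟨h2, h5⟩
            exact hkm (pvStrip_coprime_self m h2 h5)
          rw [if_neg hcm, List.append_nil]
          show List.map _ (pvBclean m) = _
          unfold pvBclean
          rw [List.map_map]
          apply List.map_congr_left
          intro x hx
          rw [pvMem_filter_range] at hx
          obtain ⟨h3, hlt, h2, h5⟩ := hx
          by_cases hxk : x = pvStrip m
          · have hb := pvBucket_step x m (by omega) h2 h5 (by omega)
            rw [if_pos hxk.symm] at hb
            have hbeq : (x == pvStrip m) = true := by simp [hxk]
            simp only [Function.comp_apply, hbeq, if_true]
            rw [← hxk, hb]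
          · have hb := hstep x h3 hlt h2 h5 (fun hh => hxk hh.symm)
            have hbeq : (x == pvStrip m) = false := by
              simp [hxk]
            simp only [Function.comp_apply, hbeq, if_false, Bool.false_eq_true, hb]

-- ===== VERDICT (by name: the statement is the Claim_ definition above) =====
theorem generate_periodics_dict_spec : Claim_equal_generate_periodics_dict := by
  intro max_n _
  unfold Spec_generate_periodics_dict
  rw [pvAlt_eq_clean, generate_periodics_dict]
  by_cases h : max_n ≤ 2
  · rw [PySem.List.pyRange_one_eq_nil h, pvBclean, PySem.List.pyRange_one_eq_nil (by omega)]
    rfl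
  · have : max_n = 2 + ((max_n - 2).toNat : Int) := by omega
    rw [this]
    exact pvMain_aux (max_n - 2).toNat
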